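-- pv_equiv track=rewrite | github.com/JonathanBeltranNeri/IA-P2 | Busqueda_En_Grafos/Satisfacción de Restricciones/022_Busqueda_Local_Minimos_Conflictos.py | mejor_valor_para
-- ===== SOURCE A (Python) =====
-- def contar_conflictos(asignacion, grafo):
--     conflictos = 0
--     for nodo in grafo:
--         for vecino in grafo[nodo]:
--             if asignacion[nodo] == asignacion.get(vecino):
--                 conflictos += 1
--     return conflictos // 2  # Se cuenta cada conflicto dos veces
--
-- def mejor_valor_para(nodo, asignacion, grafo, valores):
--     min_conflictos = float('inf')
--     mejor_valor = None
--
--     for valor in valores: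
--         asignacion_temp = asignacion.copy()
--         asignacion_temp[nodo] = valor
--         conflictos = contar_conflictos(asignacion_temp, grafo)
--         if conflictos < min_conflictos:
--             min_conflictos = conflictos
--             mejor_valor = valor
--
--     return mejor_valor
-- ===== SOURCE B (Python) =====
-- def mejor_valor_para(nodo, asignacion, grafo, valores):
--     if not valores:
--         return None
--     # One pass over the graph: split each edge's contribution into a constant
--     # part (base) and a part depending on the candidate value (conteos).
--     base = 0
--     conteos = {}
--     for u in grafo:
--         for w in grafo[u]:
--             if u == nodo:
--                 if w == nodo:
--                     base += 1
--                 else: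
--                     k = asignacion.get(w)
--                     conteos[k] = conteos.get(k, 0) + 1
--             else:
--                 au = asignacion[u]
--                 if w == nodo:
--                     conteos[au] = conteos.get(au, 0) + 1
--                 elif au == asignacion.get(w):
--                     base += 1
--     mejor_c = None
--     mejor = None
--     for v in valores:
--         c = (base + conteos.get(v, 0)) // 2
--         if mejor_c is None or c < mejor_c:
--             mejor_c = c
--             mejor = v
--     return mejor
-- ===== Notes on version B (the rewrite author's own statement) =====
-- stated objective: faster
-- what changed: A copies the assignment and recounts conflicts over the entire graph for every candidate value; B makes one aggregation pass over the graph splitting each edge's contribution into a candidate-independent constant plus a frequency table of neighbour values, then scores each candidate by a table lookup (same floor-halved score and first-wins tie-break).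
import Mathlib
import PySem

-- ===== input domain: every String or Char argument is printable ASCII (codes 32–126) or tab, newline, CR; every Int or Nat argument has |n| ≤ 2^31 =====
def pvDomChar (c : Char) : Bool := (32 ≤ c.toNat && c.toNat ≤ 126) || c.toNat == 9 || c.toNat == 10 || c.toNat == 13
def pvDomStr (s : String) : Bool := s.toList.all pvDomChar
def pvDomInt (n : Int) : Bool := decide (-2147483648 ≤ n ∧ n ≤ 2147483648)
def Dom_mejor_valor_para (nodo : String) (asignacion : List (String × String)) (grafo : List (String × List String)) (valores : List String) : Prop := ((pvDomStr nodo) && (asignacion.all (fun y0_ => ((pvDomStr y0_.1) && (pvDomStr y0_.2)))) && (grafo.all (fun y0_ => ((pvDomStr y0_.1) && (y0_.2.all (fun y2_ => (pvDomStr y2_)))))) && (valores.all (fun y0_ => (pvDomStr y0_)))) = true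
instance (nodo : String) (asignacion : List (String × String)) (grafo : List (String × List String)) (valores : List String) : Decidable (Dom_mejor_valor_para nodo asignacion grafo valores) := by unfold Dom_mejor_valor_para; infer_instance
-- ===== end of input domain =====

-- B replaces A's per-candidate copy-and-rescan of the whole graph by ONE aggregation pass
-- (a constant part `base` plus a frequency table `conteos` of the value-dependent part),
-- then a lookup pass over `valores`; same first-wins tie-break.

-- ===== PORT A =====
-- inner-loop body of contar_conflictos ('for vecino in grafo[nodo]: …'), named so the
-- nested fold can be reasoned about; `none` is exactly where Python raises KeyError
def innerA (asignacion : PySem.Dict String String) (u : String) (acc2 : Option Int) (vecino : String) : Option Int :=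
  match acc2 with
  | none => none
  | some c =>
    match asignacion.get? u with
    | none => none
    | some av => if some av = asignacion.get? vecino then some (c + 1) else some c

def contar_conflictos (asignacion : PySem.Dict String String) (grafo : PySem.Dict String (List String)) : Option Int :=
  (grafo.items.foldl (fun acc p => p.2.foldl (innerA asignacion p.1) acc)
    (some (0 : Int))).map (fun c => PySem.Int.floordiv c 2)

def mejor_valor_para (nodo : String) (asignacion : List (String × String)) (grafo : List (String × List String)) (valores : List String) : Option String :=
  let aD := PySem.Dict.ofList asignacion
  let gD := PySem.Dict.ofList grafo
  match valores.foldl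
    (fun st valor =>
      match st with
      | none => none
      | some (minC, mejor) =>
        match contar_conflictos (aD.insert nodo valor) gD with
        | none => none
        | some c =>
          match minC with
          | none => some (some c, some valor)      -- c < inf
          | some m => if c < m then some (some c, some valor) else some (minC, mejor))
    (some ((none : Option Int), (none : Option String))) with
  | none => none
  | some st => st.2

-- ===== PORT B =====
-- inner-loop body of B's single aggregation pass ('for w in grafo[u]: …');
-- `none` is exactly where Python raises KeyError on asignacion[u]
def innerB (nodo : String) (aD : PySem.Dict String String) (u : String)
    (st2 : Option (Int × PySem.Dict (Option String) Int)) (w : String) :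
    Option (Int × PySem.Dict (Option String) Int) :=
  match st2 with
  | none => none
  | some (base, conteos) =>
    if u = nodo then
      if w = nodo then some (base + 1, conteos)
      else some (base, conteos.insert (aD.get? w) (conteos.getD (aD.get? w) 0 + 1))
    else
      match aD.get? u with
      | none => none
      | some au =>
        if w = nodo then some (base, conteos.insert (some au) (conteos.getD (some au) 0 + 1))
        else if some au = aD.get? w then some (base + 1, conteos) else some (base, conteos)

def mejor_valor_para_alt (nodo : String) (asignacion : List (String × String)) (grafo : List (String × List String)) (valores : List String) : Option String :=
  if valores = [] then none
  else
    let aD := PySem.Dict.ofList asignacion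
    let gD := PySem.Dict.ofList grafo
    match gD.items.foldl (fun st p => p.2.foldl (innerB nodo aD p.1) st)
      (some ((0 : Int), (PySem.Dict.empty : PySem.Dict (Option String) Int))) with
    | none => none
    | some (base, conteos) =>
      (valores.foldl
        (fun (acc : Option (Int × String)) v =>
          let c := PySem.Int.floordiv (base + conteos.getD (some v) 0) 2
          match acc with
          | none => some (c, v)
          | some (mc, mv) => if c < mc then some (c, v) else some (mc, mv))
        none).map (fun q => q.2)

-- ===== PRECONDITION & SPEC =====
-- Pre_ excludes exactly the inputs where A raises KeyError: some candidate is tried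
-- (valores ≠ []) while the graph has a key ≠ nodo, with a nonempty neighbour list,
-- that is missing from asignacion.
def Pre_mejor_valor_para (nodo : String) (asignacion : List (String × String)) (grafo : List (String × List String)) (valores : List String) : Prop :=
  valores = [] ∨
    ∀ p ∈ (PySem.Dict.ofList grafo : PySem.Dict String (List String)).items,
      p.2 = [] ∨ p.1 = nodo ∨ (PySem.Dict.ofList asignacion : PySem.Dict String String).contains p.1 = true
instance (nodo : String) (asignacion : List (String × String)) (grafo : List (String × List String)) (valores : List String) : Decidable (Pre_mejor_valor_para nodo asignacion grafo valores) := by unfold Pre_mejor_valor_para; infer_instance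

def pvWitness_mejor_valor_para : String × (List (String × String)) × (List (String × List String)) × List String :=
  ("a", [("b", "x")], [("a", ["b"]), ("b", ["a"])], ["x", "y"])

def Spec_mejor_valor_para (nodo : String) (asignacion : List (String × String)) (grafo : List (String × List String)) (valores : List String) (out : Option String) : Prop := out = mejor_valor_para_alt nodo asignacion grafo valores
instance (nodo : String) (asignacion : List (String × String)) (grafo : List (String × List String)) (valores : List String) (out : Option String) : Decidable (Spec_mejor_valor_para nodo asignacion grafo valores out) := by unfold Spec_mejor_valor_para; infer_instance

-- ===== CLAIM (what is proved, stated in full; the proofs are below) =====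
def Claim_equal_mejor_valor_para : Prop := ∀ (nodo : String) (asignacion : List (String × String)) (grafo : List (String × List String)) (valores : List String), Dom_mejor_valor_para nodo asignacion grafo valores → Pre_mejor_valor_para nodo asignacion grafo valores → Spec_mejor_valor_para nodo asignacion grafo valores (mejor_valor_para nodo asignacion grafo valores)

-- ===== LEMMAS AND PROOFS =====

-- edge list of an adjacency structure
def edgesOf {α β : Type} (l : List (α × List β)) : List (α × β) :=
  l.flatMap (fun p => p.2.map (fun w => (p.1, w)))

theorem foldl_edgesOf {α β γ : Type} (l : List (α × List β)) (g : α → γ → β → γ) (init : γ) :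
    (edgesOf l).foldl (fun acc e => g e.1 acc e.2) init
      = l.foldl (fun acc p => p.2.foldl (g p.1) acc) init := by
  rw [edgesOf, List.foldl_flatMap]
  simp [List.foldl_map]

def contribA (asig : PySem.Dict String String) (e : String × String) : Int :=
  if asig.get? e.1 = asig.get? e.2 then 1 else 0

def OKe (nodo : String) (aD : PySem.Dict String String) (e : String × String) : Prop :=
  e.1 = nodo ∨ aD.contains e.1 = true

-- constant part of the conflict contributed by edge e (independent of the candidate)
def baseOf (nodo : String) (aD : PySem.Dict String String) (e : String × String) : Int :=
  if e.1 = nodo then (if e.2 = nodo then 1 else 0)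
  else
    match aD.get? e.1 with
    | none => 0
    | some au => if e.2 = nodo then 0 else if some au = aD.get? e.2 then 1 else 0

-- the counter key incremented by B at edge e (none: edge's contribution is constant)
def keyOf (nodo : String) (aD : PySem.Dict String String) (e : String × String) : Option (Option String) :=
  if e.1 = nodo then (if e.2 = nodo then none else some (aD.get? e.2))
  else
    match aD.get? e.1 with
    | none => none
    | some au => if e.2 = nodo then some (some au) else none

theorem get?_some_of_OKe (nodo : String) (aD : PySem.Dict String String) (e : String × String)
    (he : OKe nodo aD e) (h1 : ¬ e.1 = nodo) : ∃ au, aD.get? e.1 = some au := by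
  rcases he with h' | h'
  · exact absurd h' h1
  · rw [PySem.Dict.contains_eq_isSome_get?] at h'
    exact Option.isSome_iff_exists.mp h'

theorem stepA_eq (asig : PySem.Dict String String) (e : String × String) (c : Int)
    (h : (asig.get? e.1).isSome) :
    innerA asig e.1 (some c) e.2 = some (c + contribA asig e) := by
  obtain ⟨av, hav⟩ := Option.isSome_iff_exists.mp h
  simp only [innerA, contribA, hav]
  by_cases hc : some av = asig.get? e.2
  · simp [hc]
  · simp [hc]

theorem A_run (asig : PySem.Dict String String) :
    ∀ (es : List (String × String)) (c0 : Int),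
      (∀ e ∈ es, (asig.get? e.1).isSome) →
      es.foldl (fun acc e => innerA asig e.1 acc e.2) (some c0)
        = some (c0 + (es.map (contribA asig)).sum) := by
  intro es
  induction es with
  | nil => intro c0 _; simp
  | cons e t ih =>
    intro c0 h
    rw [List.foldl_cons, stepA_eq asig e c0 (h e (by simp)),
      ih _ (fun e' he' => h e' (by simp [he'])), List.map_cons, List.sum_cons, add_assoc]

theorem stepB_eq (nodo : String) (aD : PySem.Dict String String) (e : String × String)
    (b : Int) (d : PySem.Dict (Option String) Int) (he : OKe nodo aD e) :
    innerB nodo aD e.1 (some (b, d)) e.2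
      = some (b + baseOf nodo aD e,
          (keyOf nodo aD e).elim d (fun k => d.insert k (d.getD k 0 + 1))) := by
  by_cases h1 : e.1 = nodo
  · by_cases h2 : e.2 = nodo <;> simp [innerB, baseOf, keyOf, h1, h2]
  · obtain ⟨au, hau⟩ := get?_some_of_OKe nodo aD e he h1
    by_cases h2 : e.2 = nodo
    · simp [innerB, baseOf, keyOf, h1, h2, hau]
    · by_cases hc : some au = aD.get? e.2
      · simp [innerB, baseOf, keyOf, h1, h2, hau, ← hc]
      · simp [innerB, baseOf, keyOf, h1, h2, hau, hc]

theorem B_run (nodo : String) (aD : PySem.Dict String String) :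
    ∀ (es : List (String × String)) (b0 : Int) (d0 : PySem.Dict (Option String) Int),
      (∀ e ∈ es, OKe nodo aD e) →
      es.foldl (fun st e => innerB nodo aD e.1 st e.2) (some (b0, d0))
        = some (b0 + (es.map (baseOf nodo aD)).sum,
                (es.filterMap (keyOf nodo aD)).foldl
                  (fun d k => d.insert k (d.getD k 0 + 1)) d0) := by
  intro es
  induction es with
  | nil => intro b0 d0 _; simp
  | cons e t ih =>
    intro b0 d0 h
    have ht : ∀ e' ∈ t, OKe nodo aD e' := fun e' he' => h e' (List.mem_cons_of_mem e he')
    rw [List.foldl_cons, stepB_eq nodo aD e b0 d0 (h e (by simp))]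
    cases hk : keyOf nodo aD e with
    | none =>
      rw [List.filterMap_cons_none hk]
      simp only [Option.elim, ih _ _ ht, List.map_cons, List.sum_cons, add_assoc]
    | some k =>
      rw [List.filterMap_cons_some hk]
      simp only [Option.elim, ih _ _ ht, List.map_cons, List.sum_cons, add_assoc,
        List.foldl_cons]

-- single-edge bridge: A's conflict indicator for candidate v splits into B's constant
-- part plus the indicator that B's counter key equals v
theorem contrib_split (nodo v : String) (aD : PySem.Dict String String)
    (e : String × String) (he : OKe nodo aD e) :
    contribA (aD.insert nodo v) e
      = baseOf nodo aD e + (if keyOf nodo aD e = some (some v) then (1 : Int) else 0) := by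
  have hg : ∀ x, (aD.insert nodo v).get? x = if x = nodo then some v else aD.get? x := by
    intro x; rw [PySem.Dict.get?_insert]
  by_cases h1 : e.1 = nodo
  · by_cases h2 : e.2 = nodo
    · simp [contribA, baseOf, keyOf, hg, h1, h2]
    · by_cases hc : aD.get? e.2 = some v
      · simp [contribA, baseOf, keyOf, hg, h1, h2, hc]
      · simp [contribA, baseOf, keyOf, hg, h1, h2, hc, Ne.symm hc]
  · obtain ⟨au, hau⟩ := get?_some_of_OKe nodo aD e he h1
    by_cases h2 : e.2 = nodo
    · by_cases hc : au = v
      · simp [contribA, baseOf, keyOf, hg, h1, h2, hau, hc]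
      · simp [contribA, baseOf, keyOf, hg, h1, h2, hau, hc]
    · by_cases hc : some au = aD.get? e.2
      · simp [contribA, baseOf, keyOf, hg, h1, h2, hau, ← hc]
      · simp [contribA, baseOf, keyOf, hg, h1, h2, hau, hc]

theorem sum_split (nodo v : String) (aD : PySem.Dict String String) :
    ∀ (es : List (String × String)), (∀ e ∈ es, OKe nodo aD e) →
      (es.map (contribA (aD.insert nodo v))).sum
        = (es.map (baseOf nodo aD)).sum
          + ((es.filterMap (keyOf nodo aD)).count (some v) : Int) := by
  intro es
  induction es with
  | nil => simp
  | cons e t ih =>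
    intro h
    have ht := ih (fun e' he' => h e' (by simp [he']))
    have hsplit := contrib_split nodo v aD e (h e (by simp))
    cases hk : keyOf nodo aD e with
    | none =>
      rw [List.map_cons, List.sum_cons, hsplit, hk, List.filterMap_cons_none hk,
        List.map_cons, List.sum_cons, ht]
      simp; ring
    | some k =>
      rw [List.map_cons, List.sum_cons, hsplit, hk, List.filterMap_cons_some hk,
        List.map_cons, List.sum_cons, ht, List.count_cons]
      by_cases hkv : k = some v
      · simp [hkv]; ring
      · simp [hkv]; ring

-- A's per-candidate score, computed from B's aggregates
theorem contar_eq (nodo v : String) (aD : PySem.Dict String String)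
    (gD : PySem.Dict String (List String))
    (hOK : ∀ e ∈ edgesOf gD.items, OKe nodo aD e) :
    contar_conflictos (aD.insert nodo v) gD
      = some (PySem.Int.floordiv
          (((edgesOf gD.items).map (baseOf nodo aD)).sum
            + ((edgesOf gD.items).filterMap (keyOf nodo aD)).count (some v)) 2) := by
  have hs : ∀ e ∈ edgesOf gD.items, (((aD.insert nodo v)).get? e.1).isSome := by
    intro e he
    rw [PySem.Dict.get?_insert]
    split_ifs with h
    · simp
    · obtain ⟨au, hau⟩ := get?_some_of_OKe nodo aD e (hOK e he) h
      simp [hau]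
  unfold contar_conflictos
  rw [← foldl_edgesOf gD.items (innerA (aD.insert nodo v)) (some (0 : Int)),
    A_run (aD.insert nodo v) (edgesOf gD.items) 0 hs,
    sum_split nodo v aD (edgesOf gD.items) hOK]
  simp [Option.map_some]

-- selection loops of A and B agree from matching seeded states
theorem sel_agree (f : String → Int) :
    ∀ (vs : List String) (m : Int) (x : String),
      ∃ M X,
        vs.foldl (fun st valor =>
          match st with
          | none => none
          | some (minC, mejor) =>
            match minC with
            | none => some (some (f valor), some valor)
            | some mm => if f valor < mm then some (some (f valor), some valor) else some (minC, mejor))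
          (some (some m, some x)) = some (some M, some X)
        ∧ vs.foldl (fun acc v =>
            match acc with
            | none => some (f v, v)
            | some (mc, mv) => if f v < mc then some (f v, v) else some (mc, mv))
            (some (m, x)) = some (M, X) := by
  intro vs
  induction vs with
  | nil => intro m x; exact ⟨m, x, rfl, rfl⟩
  | cons v t ih =>
    intro m x
    by_cases hc : f v < m
    · obtain ⟨M, X, hA, hB⟩ := ih (f v) v
      exact ⟨M, X, by simpa [hc] using hA, by simpa [hc] using hB⟩
    · obtain ⟨M, X, hA, hB⟩ := ih m x
      exact ⟨M, X, by simpa [hc] using hA, by simpa [hc] using hB⟩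

-- ===== VERDICT (by name: the statement is the Claim_ definition above) =====
theorem mejor_valor_para_spec : Claim_equal_mejor_valor_para := by
  intro nodo asignacion grafo valores _hDom hPre
  unfold Spec_mejor_valor_para
  cases valores with
  | nil => rfl
  | cons v rest =>
    rcases hPre with hPre | hPre
    · exact absurd hPre (by simp)
    set aD := (PySem.Dict.ofList asignacion : PySem.Dict String String) with haD
    set gD := (PySem.Dict.ofList grafo : PySem.Dict String (List String)) with hgD
    have hOK : ∀ e ∈ edgesOf gD.items, OKe nodo aD e := by
      intro e he
      simp only [edgesOf, List.mem_flatMap, List.mem_map] at he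
      obtain ⟨p, hp, w, hw, hew⟩ := he
      rcases hPre p hp with h | h | h
      · rw [h] at hw; cases hw
      · left; rw [← hew]; exact h
      · right; rw [← hew]; exact h
    have hBrun := B_run nodo aD (edgesOf gD.items) 0 PySem.Dict.empty hOK
    rw [foldl_edgesOf gD.items (innerB nodo aD)
      (some ((0 : Int), (PySem.Dict.empty : PySem.Dict (Option String) Int)))] at hBrun
    set S := (0 : Int) + ((edgesOf gD.items).map (baseOf nodo aD)).sum with hS
    set D := ((edgesOf gD.items).filterMap (keyOf nodo aD)).foldl
      (fun d k => d.insert k (d.getD k 0 + 1))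
      (PySem.Dict.empty : PySem.Dict (Option String) Int) with hD
    set f := fun (valor : String) => PySem.Int.floordiv (S + D.getD (some valor) 0) 2 with hf
    have hcount : ∀ valor : String,
        D.getD (some valor) 0
          = (((edgesOf gD.items).filterMap (keyOf nodo aD)).count (some valor) : Int) := by
      intro valor
      rw [hD, PySem.Dict.getD_foldl_insert_add_one, PySem.Dict.getD_empty, zero_add]
    have hcontar : ∀ valor : String,
        contar_conflictos (aD.insert nodo valor) gD = some (f valor) := by
      intro valor
      rw [contar_eq nodo valor aD gD hOK]
      simp only [hf]
      rw [hcount valor, hS, zero_add]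
    -- rewrite A's selection loop body via hcontar
    have hbody : (fun (st : Option (Option Int × Option String)) (valor : String) =>
        match st with
        | none => none
        | some (minC, mejor) =>
          match contar_conflictos (aD.insert nodo valor) gD with
          | none => none
          | some c =>
            match minC with
            | none => some (some c, some valor)
            | some m => if c < m then some (some c, some valor) else some (minC, mejor))
      = (fun st valor =>
        match st with
        | none => none
        | some (minC, mejor) =>
          match minC with
          | none => some (some (f valor), some valor)
          | some mm => if f valor < mm then some (some (f valor), some valor) else some (minC, mejor)) := by
      funext st valor
      cases st with
      | none => rfl
      | some q =>
        obtain ⟨minC, mejor⟩ := q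
        rw [hcontar valor]
    -- fold B's selection loop body into f
    have hbodyB : (fun (acc : Option (Int × String)) (w : String) =>
        match acc with
        | none => some (f w, w)
        | some (mc, mv) => if f w < mc then some (f w, w) else some (mc, mv))
      = (fun (acc : Option (Int × String)) (w : String) =>
        match acc with
        | none => some (PySem.Int.floordiv (S + D.getD (some w) 0) 2, w)
        | some (mc, mv) => if PySem.Int.floordiv (S + D.getD (some w) 0) 2 < mc
            then some (PySem.Int.floordiv (S + D.getD (some w) 0) 2, w) else some (mc, mv)) := by
      funext acc w
      simp only [hf]
    rw [mejor_valor_para, mejor_valor_para_alt]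
    rw [if_neg (show ¬(v :: rest = ([] : List String)) by simp)]
    simp only [← haD, ← hgD]
    rw [hBrun]
    simp only []
    rw [hbody, ← hbodyB]
    rw [List.foldl_cons, List.foldl_cons]
    obtain ⟨M, X, hA, hB⟩ := sel_agree f rest (f v) v
    simp only []
    rw [hA, hB]
    rfl
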